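-- pv_equiv track=rewrite | github.com/TarcizioLafaiete/WallMan | manager/view/imageList_widget.py | __normImageNames
-- ===== SOURCE A (Python) =====
-- def __normImageNames(names:list[str]) -> list:
--
--     supper_names = {}
--     lower_names = {}
--
--     for name in names:
--         check = False
--         if any(letter.isupper() for letter in name):
--             check = True
--             supper_names.update({name.lower() : name})
--         lower_names.update({name.lower() : check})
--
--
--     sorted_names = sorted(list(lower_names.keys()))
--     return [supper_names[name] if lower_names[name] else name for name in sorted_names]
-- ===== SOURCE B (Python) =====
-- def __normImageNames(names: list[str]) -> list:
--     out = []
--     for name in sorted(names, key=str.lower):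
--         if out and out[-1].lower() == name.lower():
--             out[-1] = name
--         else:
--             out.append(name)
--     return out
-- ===== Notes on version B (the rewrite author's own statement) =====
-- stated objective: alternative
-- what changed: A builds two dicts (lowercase->original with uppercase, lowercase->flag) in one pass and then sorts the distinct keys; B stable-sorts the input by its lowercase key and collapses consecutive equal-key runs in one sweep, keeping the last (i.e. last-in-input) element of each run.
import Mathlib
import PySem

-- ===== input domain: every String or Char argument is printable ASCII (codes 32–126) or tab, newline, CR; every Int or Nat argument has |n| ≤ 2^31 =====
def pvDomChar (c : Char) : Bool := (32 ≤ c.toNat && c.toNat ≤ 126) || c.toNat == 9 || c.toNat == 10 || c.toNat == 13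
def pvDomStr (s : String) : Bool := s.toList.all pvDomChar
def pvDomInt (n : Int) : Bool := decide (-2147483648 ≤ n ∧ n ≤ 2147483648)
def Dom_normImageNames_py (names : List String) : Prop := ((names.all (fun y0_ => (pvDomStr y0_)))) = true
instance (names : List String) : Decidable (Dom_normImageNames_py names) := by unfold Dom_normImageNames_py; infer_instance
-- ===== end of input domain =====

-- B replaces A's two-dict hash-dedup + key sort by a stable sort on the lowercase key followed by a
-- single run-collapsing sweep keeping the last element of each run (objective: alternative decomposition).


-- ===== PORT A =====
-- one step of A's loop over `names`: state = (supper_names, lower_names)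
def pvStepA (st : PySem.Dict String String × PySem.Dict String Bool) (name : String) :
    PySem.Dict String String × PySem.Dict String Bool :=
  let check := name.toList.any PySem.Chars.isupper   -- any(letter.isupper() for letter in name)
  let supper := if check then st.1.insert (PySem.Str.lower name) name else st.1
  (supper, st.2.insert (PySem.Str.lower name) check)

def normImageNames_py (names : List String) : List String :=
  let dicts := names.foldl pvStepA (PySem.Dict.empty, PySem.Dict.empty)
  let sortedNames := PySem.List.sorted dicts.2.keys (fun x => x) false
  -- supper_names[name]: whenever lower_names[name] is True the key is present in supper_names,
  -- so getD "" is exact here (Python's dict lookup never raises on these inputs)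
  sortedNames.map (fun n => if dicts.2.getD n false then dicts.1.getD n "" else n)

-- ===== PORT B =====
-- loop body of B: collapse a run sharing the lowercase key, keeping the last element
def pvStepB (out : List String) (name : String) : List String :=
  match out.getLast? with
  | some last =>
      if PySem.Str.lower last = PySem.Str.lower name then out.dropLast ++ [name]
      else out ++ [name]
  | none => out ++ [name]

def normImageNames_py_alt (names : List String) : List String :=
  (PySem.List.sorted names (fun s => PySem.Str.lower s) false).foldl pvStepB []

-- ===== PRECONDITION & SPEC =====
def Spec_normImageNames_py (names : List String) (out : List String) : Prop := out = normImageNames_py_alt names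
instance (names : List String) (out : List String) : Decidable (Spec_normImageNames_py names out) := by unfold Spec_normImageNames_py; infer_instance

-- ===== CLAIM (what is proved, stated in full; the proofs are below) =====
def Claim_equal_normImageNames_py : Prop := ∀ (names : List String), Dom_normImageNames_py names → Spec_normImageNames_py names (normImageNames_py names)

-- ===== LEMMAS AND PROOFS =====

-- abbreviations used only by the proofs
def pvK (s : String) : String := PySem.Str.lower s
def pvUp (s : String) : Bool := s.toList.any PySem.Chars.isupper
-- the last element of `names` whose lowercase is kk
def pvLast (names : List String) (kk : String) : Option String :=
  names.reverse.find? (fun x => pvK x == kk)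
-- canonical value: for each distinct lowercase key in sorted order, the last input with that key
def pvC (names : List String) : List String :=
  (PySem.List.sorted (PySem.Set.ofList (names.map pvK)) (fun x => x) false).map
    (fun kk => (pvLast names kk).getD kk)

-- a string with no uppercase letter is its own lowercase
theorem pvLower_of_not_up (s : String) (h : pvUp s = false) : PySem.Str.lower s = s := by
  unfold pvUp at h
  simp only [List.any_eq_false] at h
  have : PySem.Chars.lower s.toList = s.toList := by
    unfold PySem.Chars.lower
    calc s.toList.map PySem.Chars.lowerChar = s.toList.map id := by
          exact List.map_congr_left (fun c hc => by simp [PySem.Chars.lowerChar, h c hc])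
      _ = s.toList := List.map_id s.toList
  simp [PySem.Str.lower, this]

-- A's pair fold splits into two independent folds
theorem pvFoldSplit (names : List String) (d1 : PySem.Dict String String) (d2 : PySem.Dict String Bool) :
    names.foldl pvStepA (d1, d2) =
      (names.foldl (fun d x => if pvUp x then d.insert (pvK x) x else d) d1,
       names.foldl (fun d x => d.insert (pvK x) (pvUp x)) d2) := by
  induction names generalizing d1 d2 with
  | nil => rfl
  | cons x t ih =>
    rw [List.foldl_cons, List.foldl_cons, List.foldl_cons,
      show pvStepA (d1, d2) x =
        ((if pvUp x then d1.insert (pvK x) x else d1), d2.insert (pvK x) (pvUp x)) from rfl,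
      ih]

-- lookup in the lower_names fold: the last occurrence wins
theorem pvGetLower (names : List String) (d : PySem.Dict String Bool) (kk : String) :
    (names.foldl (fun d x => d.insert (pvK x) (pvUp x)) d).get? kk =
      match names.reverse.find? (fun x => pvK x == kk) with
      | some x => some (pvUp x)
      | none => d.get? kk := by
  induction names using List.reverseRecOn generalizing d with
  | nil => simp
  | append_singleton t x ih =>
    rw [List.foldl_append]
    simp only [List.foldl_cons, List.foldl_nil, List.reverse_append, List.reverse_cons,
      List.reverse_nil, List.nil_append, List.cons_append, List.find?_cons]
    by_cases h : (pvK x == kk) = true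
    · have hk : pvK x = kk := eq_of_beq h
      simp only [h]
      subst hk
      rw [PySem.Dict.get?_insert_self]
    · have hne : kk ≠ pvK x := fun he => h (by simp [he])
      simp only [Bool.not_eq_true] at h
      simp only [h]
      rw [PySem.Dict.get?_insert_of_ne _ _ hne, ih]

-- lookup in the supper_names fold: last upper-containing occurrence wins
theorem pvGetSupper (names : List String) (d : PySem.Dict String String) (kk : String) :
    (names.foldl (fun d x => if pvUp x then d.insert (pvK x) x else d) d).get? kk =
      match names.reverse.find? (fun x => pvUp x && (pvK x == kk)) with
      | some x => some x
      | none => d.get? kk := by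
  induction names using List.reverseRecOn generalizing d with
  | nil => simp
  | append_singleton t x ih =>
    rw [List.foldl_append]
    simp only [List.foldl_cons, List.foldl_nil, List.reverse_append, List.reverse_cons,
      List.reverse_nil, List.nil_append, List.cons_append, List.find?_cons]
    by_cases hu : pvUp x = true
    · by_cases h : (pvK x == kk) = true
      · have hk : pvK x = kk := eq_of_beq h
        simp only [hu, h, Bool.and_self, if_true]
        subst hk
        rw [PySem.Dict.get?_insert_self]
      · have hne : kk ≠ pvK x := fun he => h (by simp [he])
        simp only [Bool.not_eq_true] at h
        simp only [hu, h, Bool.and_false, if_true]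
        rw [PySem.Dict.get?_insert_of_ne _ _ hne, ih]
    · simp only [Bool.not_eq_true] at hu
      simp only [hu, Bool.false_and]
      rw [if_neg (by simp), ih]

-- strengthening find?: if the first p-element also satisfies q, it is the first (q && p)-element
theorem pvFindStrengthen {α : Type} (l : List α) (p q : α → Bool) (a : α)
    (h : l.find? p = some a) (hq : q a = true) : l.find? (fun x => q x && p x) = some a := by
  induction l with
  | nil => simp at h
  | cons x t ih =>
    by_cases hp : p x = true
    · rw [List.find?_cons_of_pos hp] at h
      cases h
      rw [List.find?_cons_of_pos (by simp [hp, hq])]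
    · rw [List.find?_cons_of_neg (by simpa using hp)] at h
      rw [List.find?_cons_of_neg (by simp [hp]), ih h]

-- Set.ofList is a sublist of its argument
theorem pvOfListSublist {α : Type} [BEq α] (l : List α) : (PySem.Set.ofList l).Sublist l := by
  induction l using List.reverseRecOn with
  | nil => simp [PySem.Set.ofList, PySem.Set.empty]
  | append_singleton t x ih =>
    rw [show PySem.Set.ofList (t ++ [x]) = PySem.Set.add (PySem.Set.ofList t) x by
      simp [PySem.Set.ofList]]
    unfold PySem.Set.add
    split
    · exact ih.trans (List.sublist_append_left t [x])
    · exact List.Sublist.append ih (List.Sublist.refl [x])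

-- in a strictly increasing list, a member that bounds every element is the last one
theorem pvGetLastOfMax (l : List String) (a : String) (hp : l.Pairwise (· < ·))
    (ha : a ∈ l) (hmax : ∀ b ∈ l, b ≤ a) : l.getLast? = some a := by
  induction l with
  | nil => simp at ha
  | cons x t ih =>
    rcases List.mem_cons.mp ha with rfl | hat
    · cases t with
      | nil => simp
      | cons y s =>
        exfalso
        have hlt : a < y := (List.pairwise_cons.mp hp).1 y (by simp)
        exact absurd (hmax y (by simp)) (not_le.mpr hlt)
    · cases t with
      | nil => simp at hat
      | cons y s =>
        rw [List.getLast?_cons_cons]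
        exact ih hp.of_cons hat (fun b hb => hmax b (by simp [hb]))

-- dedup of an append of one element
theorem pvDedupAppend {α : Type} [BEq α] [LawfulBEq α] (l : List α) (a : α) :
    PySem.List.dedup (l ++ [a]) =
      if a ∈ l then PySem.List.dedup l else PySem.List.dedup l ++ [a] := by
  rw [PySem.List.dedup_eq_ofList, PySem.List.dedup_eq_ofList,
    show PySem.Set.ofList (l ++ [a]) = PySem.Set.add (PySem.Set.ofList l) a by
      simp [PySem.Set.ofList]]
  unfold PySem.Set.add
  by_cases h : a ∈ l
  · rw [if_pos h, if_pos]
    exact List.elem_eq_true_of_mem ((PySem.Set.mem_ofList l a).mpr h)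
  · rw [if_neg h, if_neg]
    intro hc
    exact h ((PySem.Set.mem_ofList l a).mp (List.mem_of_elem_eq_true hc))

-- dedup of a key-ordered list is strictly increasing
theorem pvDedupPairwiseLt (l : List String) (hp : l.Pairwise (· ≤ ·)) :
    (PySem.List.dedup l).Pairwise (· < ·) := by
  have hsub : (PySem.List.dedup l).Sublist l := by
    rw [PySem.List.dedup_eq_ofList]; exact pvOfListSublist l
  have hle : (PySem.List.dedup l).Pairwise (· ≤ ·) := hp.sublist hsub
  have hnd : (PySem.List.dedup l).Nodup := PySem.List.nodup_dedup l
  exact (List.Pairwise.and hle hnd).imp (fun ⟨h1, h2⟩ => lt_of_le_of_ne h1 h2)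

-- existence of the last element with a given key
theorem pvLastSpec (ys : List String) (kk : String) (h : kk ∈ ys.map pvK) :
    ∃ L, ys.reverse.find? (fun x => pvK x == kk) = some L ∧ pvK L = kk ∧ L ∈ ys := by
  obtain ⟨y, hy, hky⟩ := List.mem_map.mp h
  have : (ys.reverse.find? (fun x => pvK x == kk)).isSome := by
    rw [List.find?_isSome]
    exact ⟨y, List.mem_reverse.mpr hy, by simp [hky]⟩
  obtain ⟨L, hL⟩ := Option.isSome_iff_exists.mp this
  refine ⟨L, hL, ?_, List.mem_reverse.mp (List.mem_of_find?_eq_some hL)⟩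
  have hp := List.find?_some hL
  simpa using hp

-- step equations for the collapse sweep
theorem pvStepB_some (out : List String) (m name : String) (h : out.getLast? = some m) :
    pvStepB out name = if PySem.Str.lower m = PySem.Str.lower name
      then out.dropLast ++ [name] else out ++ [name] := by
  unfold pvStepB; rw [h]

theorem pvStepB_none (out : List String) (name : String) (h : out.getLast? = none) :
    pvStepB out name = out ++ [name] := by
  unfold pvStepB; rw [h]

-- one insertion of PySem's insertion sort, seen through a key-class filter
theorem pvInsertBy_cons {α : Type} (before : α → α → Bool) (x a : α) (t : List α) :
    PySem.List.insertBy before x (a :: t) =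
      if before x a then x :: a :: t else a :: PySem.List.insertBy before x t := rfl

theorem pvInsertFilter (acc : List String) (x : String) (kk : String)
    (hs : acc.Pairwise (fun a b => pvK a ≤ pvK b)) :
    (PySem.List.insertBy (fun a b => decide (pvK a < pvK b)) x acc).filter (fun y => pvK y == kk) =
      if pvK x == kk then acc.filter (fun y => pvK y == kk) ++ [x]
      else acc.filter (fun y => pvK y == kk) := by
  induction acc with
  | nil =>
    simp only [show PySem.List.insertBy (fun a b => decide (pvK a < pvK b)) x [] = [x] from rfl,
      List.filter_nil]
    by_cases h : (pvK x == kk) = true <;> simp [h]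
  | cons a t ih =>
    rw [pvInsertBy_cons]
    by_cases hb : decide (pvK x < pvK a) = true
    · rw [if_pos hb]
      by_cases h : (pvK x == kk) = true
      · have hkk : pvK x = kk := eq_of_beq h
        have hnil : (a :: t).filter (fun y => pvK y == kk) = [] := by
          rw [List.filter_eq_nil_iff]
          intro y hy
          have hax : pvK x < pvK y := by
            have := of_decide_eq_true hb
            rcases List.mem_cons.mp hy with rfl | hyt
            · exact this
            · exact lt_of_lt_of_le this ((List.pairwise_cons.mp hs).1 y hyt)
          simp only [beq_iff_eq]
          intro he
          exact absurd (he.trans hkk.symm) (ne_of_gt hax)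
        simp [h, hnil]
      · simp only [Bool.not_eq_true] at h
        simp [h]
    · rw [if_neg hb]
      rw [List.filter_cons, List.filter_cons]
      rw [ih (List.pairwise_cons.mp hs).2]
      by_cases h : (pvK x == kk) = true <;> by_cases ha : (pvK a == kk) = true <;>
        simp [h, ha]

-- stability of PySem's sort: the elements of each lowercase-key class keep their order
theorem pvStable (names : List String) (kk : String) :
    (PySem.List.sorted names pvK false).filter (fun x => pvK x == kk) =
      names.filter (fun x => pvK x == kk) := by
  rw [PySem.List.sorted_eq_foldl_insertBy]
  induction names using List.reverseRecOn with
  | nil => simp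
  | append_singleton t x ih =>
    rw [List.foldl_append, List.foldl_cons, List.foldl_nil]
    have hp : (t.foldl (fun acc x =>
        PySem.List.insertBy (fun a b => decide (pvK a < pvK b)) x acc)
        []).Pairwise (fun a b => pvK a ≤ pvK b) := by
      have := PySem.List.sorted_pairwise (κ := String) t pvK
      rw [PySem.List.sorted_eq_foldl_insertBy] at this
      exact this
    rw [pvInsertFilter _ _ _ hp, List.filter_append, List.filter_cons, List.filter_nil, ih]
    by_cases h : (pvK x == kk) = true <;> simp [h]

-- the collapse sweep on a key-sorted list produces one (last) element per distinct key
theorem pvCollapseSpec (ys : List String) (h : ys.Pairwise (fun a b => pvK a ≤ pvK b)) :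
    ys.foldl pvStepB [] =
      (PySem.List.dedup (ys.map pvK)).map
        (fun kk => (ys.reverse.find? (fun x => pvK x == kk)).getD kk) := by
  induction ys using List.reverseRecOn with
  | nil => simp [PySem.List.dedup, PySem.Set.ofList, PySem.Set.empty]
  | append_singleton t x ih =>
    have ht : t.Pairwise (fun a b => pvK a ≤ pvK b) := (List.pairwise_append.mp h).1
    have hmax : ∀ b ∈ t, pvK b ≤ pvK x := fun b hb =>
      (List.pairwise_append.mp h).2.2 b hb x (by simp)
    rw [List.foldl_append, List.foldl_cons, List.foldl_nil, ih ht]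
    have hmapD : ∀ kk ∈ PySem.List.dedup (t.map pvK), kk ∈ t.map pvK :=
      fun kk hk => (PySem.List.mem_dedup _ _).mp hk
    have hfind : ∀ kk, (t ++ [x]).reverse.find? (fun y => pvK y == kk) =
        if (pvK x == kk) = true then some x else t.reverse.find? (fun y => pvK y == kk) := by
      intro kk
      rw [show (t ++ [x]).reverse = x :: t.reverse by simp, List.find?_cons]
      by_cases hxk : (pvK x == kk) = true
      · rw [hxk, if_pos rfl]
      · rw [Bool.not_eq_true] at hxk
        rw [hxk, if_neg (by simp)]
    have hmapkeys : (t ++ [x]).map pvK = t.map pvK ++ [pvK x] := by simp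
    by_cases hx : pvK x ∈ t.map pvK
    · -- the run for key pvK x already exists and is the last one: replace its representative
      have hplt : (PySem.List.dedup (t.map pvK)).Pairwise (· < ·) :=
        pvDedupPairwiseLt _ (List.pairwise_map.mpr ht)
      have hDlast : (PySem.List.dedup (t.map pvK)).getLast? = some (pvK x) := by
        refine pvGetLastOfMax _ _ hplt ((PySem.List.mem_dedup _ _).mpr hx) ?_
        intro b hb
        obtain ⟨y, hy, hky⟩ := List.mem_map.mp (hmapD b hb)
        exact hky ▸ hmax y hy
      obtain ⟨L, hLfind, hLkey, _⟩ := pvLastSpec t (pvK x) hx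
      have hDdecomp : (PySem.List.dedup (t.map pvK)).dropLast ++ [pvK x] =
          PySem.List.dedup (t.map pvK) := List.dropLast_append_getLast? _ hDlast
      have hMlast : ((PySem.List.dedup (t.map pvK)).map
          (fun kk => (t.reverse.find? (fun y => pvK y == kk)).getD kk)).getLast? = some L := by
        rw [List.getLast?_map, hDlast]
        simp [hLfind]
      have hnotmem : pvK x ∉ (PySem.List.dedup (t.map pvK)).dropLast := by
        have hnd := PySem.List.nodup_dedup (t.map pvK)
        rw [← hDdecomp] at hnd
        have := List.nodup_append.mp hnd
        intro hc
        exact this.2.2 (pvK x) hc (pvK x) (by simp) rfl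
      rw [show pvStepB ((PySem.List.dedup (t.map pvK)).map
            (fun kk => (t.reverse.find? (fun y => pvK y == kk)).getD kk)) x =
          ((PySem.List.dedup (t.map pvK)).map
            (fun kk => (t.reverse.find? (fun y => pvK y == kk)).getD kk)).dropLast ++ [x] by
        rw [pvStepB_some _ _ _ hMlast]
        exact if_pos (show PySem.Str.lower L = PySem.Str.lower x from hLkey)]
      rw [hmapkeys, pvDedupAppend, if_pos hx]
      conv_rhs => rw [← hDdecomp]
      rw [List.map_append, ← List.map_dropLast]
      congr 1
      · apply List.map_congr_left
        intro kk hk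
        have hne : kk ≠ pvK x := fun he => hnotmem (he ▸ hk)
        rw [hfind, if_neg (by simp [Ne.symm hne])]
      · simp only [List.map_cons, List.map_nil]
        rw [hfind, if_pos (by simp)]
        rfl
    · -- a new, strictly larger key: append its (single) element
      have hne' : ∀ kk ∈ PySem.List.dedup (t.map pvK), kk ≠ pvK x :=
        fun kk hk he => hx (he ▸ hmapD kk hk)
      have hmapeq : (PySem.List.dedup (t.map pvK)).map
            (fun kk => ((t ++ [x]).reverse.find? (fun y => pvK y == kk)).getD kk) =
          (PySem.List.dedup (t.map pvK)).map
            (fun kk => (t.reverse.find? (fun y => pvK y == kk)).getD kk) := by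
        apply List.map_congr_left
        intro kk hk
        rw [hfind, if_neg (by simp [Ne.symm (hne' kk hk)])]
      rw [hmapkeys, pvDedupAppend, if_neg hx, List.map_append, hmapeq]
      have hstep : pvStepB ((PySem.List.dedup (t.map pvK)).map
            (fun kk => (t.reverse.find? (fun y => pvK y == kk)).getD kk)) x =
          ((PySem.List.dedup (t.map pvK)).map
            (fun kk => (t.reverse.find? (fun y => pvK y == kk)).getD kk)) ++ [x] := by
        cases hM : ((PySem.List.dedup (t.map pvK)).map
            (fun kk => (t.reverse.find? (fun y => pvK y == kk)).getD kk)).getLast? with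
        | none => exact pvStepB_none _ _ hM
        | some m =>
          rw [pvStepB_some _ _ _ hM]
          rw [List.getLast?_map] at hM
          cases hD : (PySem.List.dedup (t.map pvK)).getLast? with
          | none => rw [hD] at hM; simp at hM
          | some kk0 =>
            rw [hD] at hM
            simp only [Option.map_some, Option.some.injEq] at hM
            have hk0mem : kk0 ∈ PySem.List.dedup (t.map pvK) := by
              obtain ⟨l', hl'⟩ := List.getLast?_eq_some_iff.mp hD
              rw [hl']; simp
            obtain ⟨L0, hL0find, hL0key, _⟩ := pvLastSpec t kk0 (hmapD kk0 hk0mem)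
            have hm : m = L0 := by rw [← hM, hL0find]; rfl
            rw [if_neg]
            rw [hm]
            intro hc
            exact hne' kk0 hk0mem (by rw [← hL0key]; exact hc)
      rw [hstep]
      congr 1
      simp only [List.map_cons, List.map_nil]
      rw [hfind, if_pos (by simp)]
      rfl

-- A computes the canonical value
theorem pvA_eq_C (names : List String) : normImageNames_py names = pvC names := by
  show (PySem.List.sorted (names.foldl pvStepA (PySem.Dict.empty, PySem.Dict.empty)).2.keys
      (fun x => x) false).map
      (fun n => if (names.foldl pvStepA (PySem.Dict.empty, PySem.Dict.empty)).2.getD n false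
        then (names.foldl pvStepA (PySem.Dict.empty, PySem.Dict.empty)).1.getD n "" else n) =
    pvC names
  rw [pvFoldSplit]
  have hkeys : (names.foldl (fun d x => d.insert (pvK x) (pvUp x))
      (PySem.Dict.empty : PySem.Dict String Bool)).keys = PySem.Set.ofList (names.map pvK) := by
    rw [PySem.Dict.keys_foldl_insert_key names pvK (fun _ x => pvUp x) PySem.Dict.empty]
    simp [PySem.Set.update_nil_left]
  unfold pvC
  simp only
  rw [hkeys]
  apply List.map_congr_left
  intro kk hkk
  have hmem : kk ∈ names.map pvK := by
    have := (PySem.List.mem_sorted (xs := PySem.Set.ofList (names.map pvK))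
      (key := fun x => x) (rev := false) (x := kk)).mp hkk
    exact (PySem.Set.mem_ofList _ _).mp this
  obtain ⟨L, hLfind, hLkey, _⟩ := pvLastSpec names kk hmem
  have hlow : (names.foldl (fun d x => d.insert (pvK x) (pvUp x))
      (PySem.Dict.empty : PySem.Dict String Bool)).getD kk false = pvUp L := by
    rw [PySem.Dict.getD_eq_get?_getD, pvGetLower, hLfind]
    rfl
  rw [hlow]
  unfold pvLast
  rw [hLfind]
  by_cases hu : pvUp L = true
  · rw [if_pos hu]
    have hsup : (names.foldl (fun d x => if pvUp x then d.insert (pvK x) x else d)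
        (PySem.Dict.empty : PySem.Dict String String)).getD kk "" = L := by
      rw [PySem.Dict.getD_eq_get?_getD, pvGetSupper,
        pvFindStrengthen _ _ _ _ hLfind hu]
      rfl
    rw [hsup]
    rfl
  · rw [if_neg hu]
    rw [Bool.not_eq_true] at hu
    have : L = kk := by
      have := pvLower_of_not_up L hu
      rw [← hLkey]
      exact this.symm
    rw [this]
    rfl

-- B computes the canonical value
theorem pvB_eq_C (names : List String) : normImageNames_py_alt names = pvC names := by
  unfold normImageNames_py_alt
  rw [show (fun s => PySem.Str.lower s) = pvK from rfl,
    pvCollapseSpec _ (PySem.List.sorted_pairwise names pvK)]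
  have hkeys : PySem.List.dedup ((PySem.List.sorted names pvK false).map pvK) =
      PySem.List.sorted (PySem.Set.ofList (names.map pvK)) (fun x => x) false := by
    symm
    apply PySem.List.sorted_eq_of_perm_of_pairwise_lt
    · refine (List.perm_ext_iff_of_nodup (PySem.List.nodup_dedup _)
        (PySem.Set.nodup_ofList _)).mpr ?_
      intro a
      rw [PySem.List.mem_dedup, PySem.Set.mem_ofList, List.mem_map, List.mem_map]
      constructor
      · rintro ⟨y, hy, rfl⟩
        exact ⟨y, (PySem.List.mem_sorted names pvK false y).mp hy, rfl⟩
      · rintro ⟨y, hy, rfl⟩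
        exact ⟨y, (PySem.List.mem_sorted names pvK false y).mpr hy, rfl⟩
    · exact pvDedupPairwiseLt _ (PySem.List.sorted_map_key_pairwise names pvK)
  rw [hkeys]
  unfold pvC pvLast
  apply List.map_congr_left
  intro kk _
  have hfilter := pvStable names kk
  have h1 : (PySem.List.sorted names pvK false).reverse.find? (fun x => pvK x == kk) =
      names.reverse.find? (fun x => pvK x == kk) := by
    rw [← List.head?_filter, ← List.head?_filter, List.filter_reverse, List.filter_reverse,
      hfilter]
  rw [h1]

-- ===== VERDICT (by name: the statement is the Claim_ definition above) =====
theorem normImageNames_py_spec : Claim_equal_normImageNames_py := by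
  intro names _
  unfold Spec_normImageNames_py
  rw [pvA_eq_C, pvB_eq_C]
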